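-- pv_equiv track=rewrite | github.com/kristsyp/portfolio | 01_poem_generator/reward.py | has_rhyme
-- ===== SOURCE A (Python) =====
-- def has_rhyme(rhyme_tags):
--     """
--     Проверяет наличие рифмы в списке тегов.
--     """
--
--     if not rhyme_tags:
--         return False
--
--     # Игнорируем None при подсчете рифм
--     filtered_tags = [tag for tag in rhyme_tags if tag is not None]
--
--     if len(filtered_tags) < 2:
--         return False
--
--     # Теперь продолжаем обработку
--     unique_tags = set(filtered_tags)
--
--     for tag in unique_tags:
--         if filtered_tags.count(tag) > 1:
--             return True
--
--     return False
-- ===== SOURCE B (Python) =====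
-- def has_rhyme(rhyme_tags):
--     filtered = [tag for tag in rhyme_tags if tag is not None]
--     return len(filtered) != len(set(filtered))
-- ===== Notes on version B (the rewrite author's own statement) =====
-- stated objective: simpler
-- what changed: Replaces the guards and the explicit loop counting each unique tag's occurrences with a single cardinality comparison: a list has a repeat iff its set is strictly smaller.
import Mathlib
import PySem

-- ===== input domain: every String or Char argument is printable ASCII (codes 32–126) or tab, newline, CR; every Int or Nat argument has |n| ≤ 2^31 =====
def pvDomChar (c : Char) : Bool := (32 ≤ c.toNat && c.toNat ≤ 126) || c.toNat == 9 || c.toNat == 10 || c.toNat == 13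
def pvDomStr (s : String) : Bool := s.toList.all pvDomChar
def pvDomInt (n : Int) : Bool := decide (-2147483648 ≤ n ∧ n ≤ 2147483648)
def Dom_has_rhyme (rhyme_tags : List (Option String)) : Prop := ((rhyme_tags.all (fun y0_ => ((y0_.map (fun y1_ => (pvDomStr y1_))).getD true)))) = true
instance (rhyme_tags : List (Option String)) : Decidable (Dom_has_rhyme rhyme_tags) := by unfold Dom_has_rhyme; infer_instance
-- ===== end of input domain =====

-- B replaces A's guards and per-unique-tag count loop with a single cardinality comparison (simpler; same cost).


-- ===== PORT A =====
-- Literal transliteration of A: empty guard, filter out None, <2 guard, then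
-- loop over the unique tags looking for one with count > 1 (order-independent any).
def has_rhyme (rhyme_tags : List (Option String)) : Bool :=
  if rhyme_tags.isEmpty then false
  else
    let filtered_tags := rhyme_tags.filterMap id
    if filtered_tags.length < 2 then false
    else
      let unique_tags : PySem.Set String := PySem.Set.ofList filtered_tags
      unique_tags.any (fun tag => decide (1 < filtered_tags.count tag))

-- ===== PORT B =====
-- B: filter out None, then one cardinality comparison (repeat iff set is smaller).
def has_rhyme_alt (rhyme_tags : List (Option String)) : Bool :=
  let filtered := rhyme_tags.filterMap id
  decide (filtered.length ≠ (PySem.Set.ofList filtered).length)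

-- ===== PRECONDITION & SPEC =====
def Spec_has_rhyme (rhyme_tags : List (Option String)) (out : Bool) : Prop := out = has_rhyme_alt rhyme_tags
instance (rhyme_tags : List (Option String)) (out : Bool) : Decidable (Spec_has_rhyme rhyme_tags out) := by unfold Spec_has_rhyme; infer_instance

-- ===== CLAIM (what is proved, stated in full; the proofs are below) =====
def Claim_equal_has_rhyme : Prop := ∀ (rhyme_tags : List (Option String)), Dom_has_rhyme rhyme_tags → Spec_has_rhyme rhyme_tags (has_rhyme rhyme_tags)

-- ===== LEMMAS AND PROOFS =====

-- ===== VERDICT (by name: the statement is the Claim_ definition above) =====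
-- a list of length at most one has no duplicates
theorem nodup_of_len_le_one {α : Type} (l : List α) (h : l.length ≤ 1) : l.Nodup := by
  match l with
  | [] => simp
  | [a] => simp
  | a :: b :: t => simp at h

-- set(l) has as many elements as l exactly when l has no duplicates
theorem ofList_length_eq_iff (l : List String) :
    (PySem.Set.ofList l).length = l.length ↔ l.Nodup := by
  constructor
  · intro h
    have hperm : (PySem.Set.ofList l).Perm l.dedup := by
      refine (List.perm_ext_iff_of_nodup (PySem.Set.nodup_ofList l) l.nodup_dedup).2 ?_
      intro x; rw [PySem.Set.mem_ofList, List.mem_dedup]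
    have hlen : l.dedup.length = l.length := by
      rw [← hperm.length_eq, h]
    have : l.dedup = l := l.dedup_sublist.eq_of_length hlen
    rw [← this]; exact l.nodup_dedup
  · intro h
    rw [show PySem.Set.ofList l = l from PySem.Set.ofList_eq_self_of_nodup l h]

-- A's loop over the unique tags returns true exactly when l has a duplicate
theorem any_count_eq (l : List String) :
    ((PySem.Set.ofList l).any (fun tag => decide (1 < l.count tag))) = !decide l.Nodup := by
  by_cases h : l.Nodup
  · simp only [h, decide_true, Bool.not_true, List.any_eq_false]
    intro x _
    have := (List.nodup_iff_count_le_one.1 h) x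
    simp; omega
  · simp only [h, decide_false, Bool.not_false, List.any_eq_true]
    rw [List.nodup_iff_count_le_one] at h
    push Not at h
    obtain ⟨x, hx⟩ := h
    refine ⟨x, ?_, by simpa using hx⟩
    rw [PySem.Set.mem_ofList]
    exact List.count_pos_iff.1 (by omega)

theorem has_rhyme_spec : Claim_equal_has_rhyme := by
  intro rhyme_tags _
  unfold Spec_has_rhyme has_rhyme has_rhyme_alt
  set l := rhyme_tags.filterMap id with hl
  have hb : decide (l.length ≠ (PySem.Set.ofList l).length) = !decide l.Nodup := by
    by_cases h : l.Nodup
    · simp [h, (ofList_length_eq_iff l).2 h]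
    · simp only [h, decide_false, Bool.not_false, decide_eq_true_eq]
      intro heq
      exact h ((ofList_length_eq_iff l).1 heq.symm)
  rw [hb]
  by_cases h1 : rhyme_tags.isEmpty = true
  · have he : l = [] := by simp [hl, List.isEmpty_iff.1 h1]
    simp [h1, he]
  · rw [if_neg h1]
    by_cases h2 : l.length < 2
    · rw [if_pos h2]
      have hn : l.Nodup := nodup_of_len_le_one l (by omega)
      simp [hn]
    · rw [if_neg h2, any_count_eq]
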